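-- pv_equiv track=rewrite | github.com/anurag5398/DSA-Problems | StringAlgo/SameCyclicPermutation.py | solve
-- ===== SOURCE A (Python) =====
-- def zAlgo(s):
--     l, r = 0, 0
--     n = len(s)
--     z = [None]*n
--     z[0] = n
--     for i in range(1, n):
--         if i > r:
--             l, r = i, i
--             while r < n and s[r] == s[r-l]: r+=1
--             z[i] = r-l
--             r-=1
--         else:
--             if i + z[i-l] <= r: z[i] = z[i-l]
--             else:
--                 l = i
--                 while r < n and s[r] == s[r-l]: r+=1
--                 z[i] = r-l
--                 r-=1
--     return z
--
-- def solve(A, B):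
--     B = B + B
--     B = B[0:-1]
--     size = len(A)
--     string = A + "#" + B
--     temp = zAlgo(string)
--     count = 0
--     for i, val in enumerate(temp):
--         if i == 0:
--             continue
--         if val >= size: count+=1
--     return count
-- ===== SOURCE B (Python) =====
-- def solve(A, B):
--     T = A + "#" + (B + B)[0:-1]
--     return sum(1 for i in range(1, len(T)) if T[i:i+len(A)] == A)
-- ===== Notes on version B (the rewrite author's own statement) =====
-- stated objective: simpler
-- what changed: Replaces the hand-rolled Z-algorithm (l/r window, z-array, enumerate pass) with a direct one-line scan that compares each length-|A| slice of A+'#'+(B+B)[:-1] against A, counting the matches.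
import Mathlib
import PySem

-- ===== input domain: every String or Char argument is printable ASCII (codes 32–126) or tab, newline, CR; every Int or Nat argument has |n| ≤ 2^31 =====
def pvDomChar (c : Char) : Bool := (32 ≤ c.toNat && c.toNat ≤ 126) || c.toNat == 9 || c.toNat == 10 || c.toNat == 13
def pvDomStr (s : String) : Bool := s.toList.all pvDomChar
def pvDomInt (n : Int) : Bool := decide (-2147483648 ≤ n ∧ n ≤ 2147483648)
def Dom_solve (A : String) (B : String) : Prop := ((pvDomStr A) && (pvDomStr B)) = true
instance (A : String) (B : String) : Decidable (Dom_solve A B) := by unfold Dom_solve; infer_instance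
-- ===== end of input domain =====

-- B re-implements the match count as a direct slice-comparison scan (simpler, no Z-array);
-- equivalence of return values is proved for ALL inputs (both functions are total).

-- ===== PORT A =====
-- zAlgo's inner `while` loops (extend r while characters match):
def pvExtend (s : List Char) (l r : Nat) : Nat :=
  if h : r < s.length ∧ s.getD r ' ' = s.getD (r - l) ' ' then pvExtend s l (r + 1) else r
termination_by s.length - r
decreasing_by omega

-- zAlgo's `for i in range(1, n)` loop over the state (l, r, z):
def pvZLoop (s : List Char) (i l r : Nat) (z : List (Option Int)) : List (Option Int) :=
  if i < s.length then
    if r < i then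
      let r' := pvExtend s i i
      pvZLoop s (i + 1) i (r' - 1) (z.set i (some ((r' - i : Nat) : Int)))
    else
      match z.getD (i - l) none with
      | some v =>
        if (i : Int) + v ≤ (r : Int) then
          pvZLoop s (i + 1) l r (z.set i (some v))
        else
          let r' := pvExtend s i r
          pvZLoop s (i + 1) i (r' - 1) (z.set i (some ((r' - i : Nat) : Int)))
      | none => z         -- unreachable: z[i-l] is always assigned before it is read
  else z
termination_by s.length - i

-- zAlgo(s): z = [None]*n; z[0] = n; then the loop from i = 1
def pvZAlgo (s : List Char) : List (Option Int) :=
  pvZLoop s 1 0 0 (((List.replicate s.length (none : Option Int))).set 0 (some (s.length : Int)))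

def solve (A : String) (B : String) : Int :=
  let b := PySem.List.slice (B.toList ++ B.toList) (some 0) (some (-1))
  let size := A.toList.length
  let string := A.toList ++ ['#'] ++ b
  let temp := pvZAlgo string
  (PySem.List.enumerate temp 0).foldl
    (fun count iv =>
      if iv.1 = 0 then count
      else
        match iv.2 with
        | some v => if (size : Int) ≤ v then count + 1 else count
        | none => count) 0

-- ===== PORT B =====
def solve_alt (A : String) (B : String) : Int :=
  let a := A.toList
  let t := a ++ ['#'] ++ PySem.List.slice (B.toList ++ B.toList) (some 0) (some (-1))
  (PySem.List.pyRange 1 (t.length : Int) 1).foldl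
    (fun acc i => acc + (if PySem.List.slice t (some i) (some (i + (a.length : Int))) = a then 1 else 0)) 0

-- ===== PRECONDITION & SPEC =====
def Spec_solve (A : String) (B : String) (out : Int) : Prop := out = solve_alt A B
instance (A : String) (B : String) (out : Int) : Decidable (Spec_solve A B out) := by unfold Spec_solve; infer_instance

-- ===== CLAIM (what is proved, stated in full; the proofs are below) =====
def Claim_equal_solve : Prop := ∀ (A : String) (B : String), Dom_solve A B → Spec_solve A B (solve A B)

-- ===== LEMMAS AND PROOFS =====
-- pvLcp u v = length of the longest common prefix of u and v; the Z-value of s at j is pvLcp s (s.drop j).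

def pvLcp : List Char → List Char → Nat
  | a :: as, b :: bs => if a = b then pvLcp as bs + 1 else 0
  | _, _ => 0

lemma pvLcp_le_left : ∀ (u v : List Char), pvLcp u v ≤ u.length := by
  intro u
  induction u with
  | nil => intro v; cases v <;> simp [pvLcp]
  | cons a as ih =>
    intro v
    cases v with
    | nil => simp [pvLcp]
    | cons b bs =>
      simp only [pvLcp]
      split
      · simpa using ih bs
      · simp

lemma pvLcp_le_right : ∀ (u v : List Char), pvLcp u v ≤ v.length := by
  intro u
  induction u with
  | nil => intro v; cases v <;> simp [pvLcp]
  | cons a as ih =>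
    intro v
    cases v with
    | nil => simp [pvLcp]
    | cons b bs =>
      simp only [pvLcp]
      split
      · simpa using ih bs
      · simp

lemma pvLcp_self : ∀ (u : List Char), pvLcp u u = u.length := by
  intro u; induction u with
  | nil => simp [pvLcp]
  | cons a as ih => simp [pvLcp, ih]

lemma pv_le_lcp_iff : ∀ (k : Nat) (u v : List Char), k ≤ u.length →
    (k ≤ pvLcp u v ↔ v.take k = u.take k) := by
  intro k
  induction k with
  | zero => simp
  | succ k ih =>
    intro u v hk
    cases u with
    | nil => simp at hk
    | cons a as =>
      cases v with
      | nil =>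
        simp [pvLcp]
      | cons b bs =>
        simp only [pvLcp, List.take_succ_cons]
        by_cases hab : a = b
        · subst hab
          simp only [if_true, Nat.add_le_add_iff_right, ih as bs (by simpa using hk)]
          simp
        · rw [if_neg hab]
          simp [Ne.symm hab]

lemma pvLcp_eq_of (u v : List Char) (k : Nat) (h : v.take k = u.take k)
    (h1 : k ≤ u.length) (hne : u[k]? ≠ v[k]?) : pvLcp u v = k := by
  have hge : k ≤ pvLcp u v := (pv_le_lcp_iff k u v h1).mpr h
  rcases Nat.lt_or_ge (pvLcp u v) (k+1) with hlt | hge'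
  · omega
  · exfalso
    have h1' : k + 1 ≤ u.length := le_trans hge' (pvLcp_le_left u v)
    have heq : v.take (k+1) = u.take (k+1) := (pv_le_lcp_iff (k+1) u v h1').mp hge'
    have := congrArg (fun l => l[k]?) heq
    simp only [List.getElem?_take] at this
    simp at this
    exact hne this.symm

lemma pvLcp_mismatch (u v : List Char) (h1 : pvLcp u v < u.length) :
    u[pvLcp u v]? ≠ v[pvLcp u v]? := by
  intro heq
  have ht : v.take (pvLcp u v) = u.take (pvLcp u v) :=
    (pv_le_lcp_iff _ u v (le_of_lt h1)).mp le_rfl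
  have : pvLcp u v + 1 ≤ pvLcp u v := by
    rw [pv_le_lcp_iff (pvLcp u v + 1) u v (by omega)]
    rw [List.take_add_one, List.take_add_one, ht, heq]
  omega

lemma pvTake_drop_congr (u v : List α) (K j m : Nat) (h : u.take K = v.take K)
    (hjm : j + m ≤ K) : (u.drop j).take m = (v.drop j).take m := by
  have e : ∀ (w : List α), (w.drop j).take m = ((w.take K).drop j).take m := by
    intro w
    rw [List.drop_take, List.take_take]
    congr 1
    omega
  rw [e u, e v, h]

lemma pvExtend_eq (s : List Char) (l : Nat) (hl : 1 ≤ l) :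
    ∀ (fuel r : Nat), s.length - r = fuel → l ≤ r → r ≤ s.length →
    (s.drop l).take (r - l) = s.take (r - l) →
    pvExtend s l r = l + pvLcp s (s.drop l) := by
  intro fuel
  induction fuel with
  | zero =>
    intro r hf hlr hr hm
    have hrn : r = s.length := by omega
    rw [pvExtend]
    rw [dif_neg (by omega)]
    have hlen : (s.drop l).length = r - l := by simp [hrn]
    have hle : pvLcp s (s.drop l) ≤ r - l := hlen ▸ pvLcp_le_right s (s.drop l)
    have hge : r - l ≤ pvLcp s (s.drop l) :=
      (pv_le_lcp_iff (r - l) s (s.drop l) (by omega)).mpr hm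
    omega
  | succ fuel ih =>
    intro r hf hlr hr hm
    have hrn : r < s.length := by omega
    rw [pvExtend]
    by_cases hc : s.getD r ' ' = s.getD (r - l) ' '
    · rw [dif_pos ⟨hrn, hc⟩]
      apply ih (r + 1) (by omega) (by omega) (by omega)
      have hstep : r + 1 - l = (r - l) + 1 := by omega
      rw [hstep, List.take_add_one, List.take_add_one, hm]
      congr 1
      have e1 : (s.drop l)[r - l]? = s[r]? := by
        rw [List.getElem?_drop]
        congr 1
        omega
      rw [e1]
      have e2 : s[r]? = some (s.getD r ' ') := by
        rw [List.getD_eq_getElem?_getD, List.getElem?_eq_getElem hrn]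
        simp
      have e3 : s[r - l]? = some (s.getD (r - l) ' ') := by
        rw [List.getD_eq_getElem?_getD, List.getElem?_eq_getElem (by omega : r - l < s.length)]
        simp
      rw [e2, e3, hc]
    · rw [dif_neg (by tauto)]
      have heq : pvLcp s (s.drop l) = r - l := by
        apply pvLcp_eq_of s (s.drop l) (r - l) hm (by omega)
        have e1 : (s.drop l)[r - l]? = s[r]? := by
          rw [List.getElem?_drop]; congr 1; omega
        rw [e1]
        rw [List.getElem?_eq_getElem hrn, List.getElem?_eq_getElem (by omega : r - l < s.length)]
        intro hcon
        apply hc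
        have : s[r - l] = s[r] := by simpa using hcon
        rw [List.getD_eq_getElem?_getD, List.getD_eq_getElem?_getD,
            List.getElem?_eq_getElem hrn, List.getElem?_eq_getElem (by omega : r - l < s.length)]
        simp [this]
      omega

-- Inside the Z-window [l, r] (r + 1 = l + pvLcp s (s.drop l)) the text repeats its prefix:

lemma pvWindow (s : List Char) (l i m : Nat) (hli : l ≤ i)
    (hm : (i - l) + m ≤ pvLcp s (s.drop l)) :
    (s.drop i).take m = (s.drop (i - l)).take m := by
  have hK : pvLcp s (s.drop l) ≤ s.length := pvLcp_le_left s (s.drop l)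
  have hbase : (s.drop l).take (pvLcp s (s.drop l)) = s.take (pvLcp s (s.drop l)) :=
    (pv_le_lcp_iff _ s (s.drop l) hK).mp le_rfl
  have e : s.drop i = (s.drop l).drop (i - l) := by
    rw [List.drop_drop]
    congr 1
    omega
  rw [e]
  exact pvTake_drop_congr (s.drop l) s _ (i - l) m hbase hm

lemma pvZsp_copy (s : List Char) (l i r : Nat) (hli : l < i)
    (hr : r + 1 = l + pvLcp s (s.drop l)) (hk : i + pvLcp s (s.drop (i - l)) ≤ r) :
    pvLcp s (s.drop i) = pvLcp s (s.drop (i - l)) := by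
  set k := pvLcp s (s.drop (i - l)) with hkdef
  have hKle : pvLcp s (s.drop l) ≤ s.length - l := by
    have := pvLcp_le_right s (s.drop l)
    simpa using this
  have hrn : r < s.length := by omega
  have hwin : (s.drop i).take (k + 1) = (s.drop (i - l)).take (k + 1) :=
    pvWindow s l i (k + 1) (by omega) (by omega)
  have hkles : k ≤ s.length := le_trans (pvLcp_le_left _ _) le_rfl
  have htk : (s.drop (i - l)).take k = s.take k :=
    (pv_le_lcp_iff k s (s.drop (i - l)) hkles).mp le_rfl
  have hne : s[k]? ≠ (s.drop (i - l))[k]? := pvLcp_mismatch s (s.drop (i - l)) (by omega)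
  apply pvLcp_eq_of s (s.drop i) k _ (by omega)
  · -- mismatch transfers through the window
    have e1 : (s.drop i)[k]? = (s.drop (i - l))[k]? := by
      have := congrArg (fun w => w[k]?) hwin
      simpa [List.getElem?_take, Nat.lt_succ_self] using this
    rw [e1]
    exact hne
  · -- take k agreement
    have e2 : (s.drop i).take k = (s.drop (i - l)).take k :=
      pvWindow s l i k (by omega) (by omega)
    rw [e2, htk]

lemma pvGetD_set_self (z : List (Option Int)) (i : Nat) (v : Option Int) (h : i < z.length) :
    (z.set i v).getD i none = v := by
  simp [List.getD_eq_getElem?_getD, h]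

lemma pvGetD_set_ne (z : List (Option Int)) (i j : Nat) (v : Option Int) (h : i ≠ j) :
    (z.set i v).getD j none = z.getD j none := by
  simp [List.getD_eq_getElem?_getD, h]

lemma pvZLoop_inv (s : List Char) : ∀ (fuel i l r : Nat) (z : List (Option Int)),
    s.length - i = fuel → 1 ≤ i → z.length = s.length →
    (∀ j, j < i → j < s.length → z.getD j none = some ((pvLcp s (s.drop j) : Nat) : Int)) →
    (r < i ∨ (1 ≤ l ∧ l < i ∧ r + 1 = l + pvLcp s (s.drop l))) →
    ∀ j, j < s.length → (pvZLoop s i l r z).getD j none = some ((pvLcp s (s.drop j) : Nat) : Int) := by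
  intro fuel
  induction fuel with
  | zero =>
    intro i l r z hf h1 hlen hz hinv j hj
    rw [pvZLoop, if_neg (by omega)]
    exact hz j (by omega) hj
  | succ fuel ih =>
    intro i l r z hf h1 hlen hz hinv j hj
    have hin : i < s.length := by omega
    rw [pvZLoop, if_pos hin]
    by_cases hri : r < i
    · rw [if_pos hri]
      have hext : pvExtend s i i = i + pvLcp s (s.drop i) :=
        pvExtend_eq s i h1 (s.length - i) i rfl le_rfl (le_of_lt hin) (by simp)
      apply ih (i + 1) i (pvExtend s i i - 1) _ (by omega) (by omega)
          (by simpa using hlen)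
      · intro j' hj' hjs
        by_cases hji : j' = i
        · subst hji
          rw [pvGetD_set_self z j' _ (by omega), hext]
          congr 2
          omega
        · rw [pvGetD_set_ne z i j' _ (fun he => hji he.symm)]
          exact hz j' (by omega) hjs
      · right
        refine ⟨h1, by omega, ?_⟩
        rw [hext]
        omega
      · exact hj
    · rw [if_neg hri]
      rcases hinv with hbad | ⟨hl1, hli, hr⟩
      · omega
      have hread : z.getD (i - l) none = some ((pvLcp s (s.drop (i - l)) : Nat) : Int) :=
        hz (i - l) (by omega) (by omega)
      simp only [hread]
      have hKle : pvLcp s (s.drop l) ≤ s.length - l := by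
        simpa using pvLcp_le_right s (s.drop l)
      by_cases hcase : (i : Int) + ((pvLcp s (s.drop (i - l)) : Nat) : Int) ≤ (r : Int)
      · rw [if_pos hcase]
        have hcopy : pvLcp s (s.drop i) = pvLcp s (s.drop (i - l)) :=
          pvZsp_copy s l i r hli hr (by exact_mod_cast hcase)
        apply ih (i + 1) l r _ (by omega) (by omega) (by simpa using hlen)
        · intro j' hj' hjs
          by_cases hji : j' = i
          · subst hji
            rw [pvGetD_set_self z j' _ (by omega), hcopy]
          · rw [pvGetD_set_ne z i j' _ (fun he => hji he.symm)]
            exact hz j' (by omega) hjs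
        · right; exact ⟨hl1, by omega, hr⟩
        · exact hj
      · rw [if_neg hcase]
        have hkge : r < i + pvLcp s (s.drop (i - l)) := by
          by_contra hcon
          exact hcase (by exact_mod_cast Int.ofNat_le.mpr (by omega))
        have hm : (s.drop i).take (r - i) = s.take (r - i) := by
          have h1' : (s.drop i).take (r - i) = (s.drop (i - l)).take (r - i) :=
            pvWindow s l i (r - i) (by omega) (by omega)
          have h2' : (s.drop (i - l)).take (r - i) = s.take (r - i) :=
            (pv_le_lcp_iff (r - i) s (s.drop (i - l)) (by omega)).mp (by omega)
          rw [h1', h2']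
        have hext : pvExtend s i r = i + pvLcp s (s.drop i) := by
          exact pvExtend_eq s i h1 (s.length - r) r rfl (by omega) (by omega) hm
        apply ih (i + 1) i (pvExtend s i r - 1) _ (by omega) (by omega)
            (by simpa using hlen)
        · intro j' hj' hjs
          by_cases hji : j' = i
          · subst hji
            rw [pvGetD_set_self z j' _ (by omega), hext]
            congr 2
            omega
          · rw [pvGetD_set_ne z i j' _ (fun he => hji he.symm)]
            exact hz j' (by omega) hjs
        · right
          refine ⟨h1, by omega, ?_⟩
          rw [hext]
          omega
        · exact hj

lemma pvZLoop_length (s : List Char) : ∀ (fuel i l r : Nat) (z : List (Option Int)),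
    s.length - i = fuel → (pvZLoop s i l r z).length = z.length := by
  intro fuel
  induction fuel with
  | zero =>
    intro i l r z hf
    rw [pvZLoop]
    split
    · omega
    · rfl
  | succ fuel ih =>
    intro i l r z hf
    rw [pvZLoop]
    split
    · split
      · rw [ih (i + 1) _ _ _ (by omega)]
        simp
      · split
        · split
          · rw [ih (i + 1) _ _ _ (by omega)]; simp
          · rw [ih (i + 1) _ _ _ (by omega)]; simp
        · rfl
    · rfl

lemma pvZAlgo_length (s : List Char) : (pvZAlgo s).length = s.length := by
  rw [pvZAlgo, pvZLoop_length s (s.length - 1) 1 0 0 _ rfl]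
  simp

lemma pvZAlgo_correct (s : List Char) (hs : s ≠ []) :
    ∀ j, j < s.length → (pvZAlgo s).getD j none = some ((pvLcp s (s.drop j) : Nat) : Int) := by
  have hn : 1 ≤ s.length := by
    cases s with
    | nil => exact absurd rfl hs
    | cons a as => simp
  apply pvZLoop_inv s (s.length - 1) 1 0 0 _ rfl le_rfl (by simp)
  · intro j hj hjs
    have hj0 : j = 0 := by omega
    subst hj0
    rw [pvGetD_set_self _ 0 _ (by simpa using hn)]
    simp [pvLcp_self]
  · left; omega

lemma pvZAlgo_eq_map (s : List Char) (hs : s ≠ []) :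
    pvZAlgo s = (List.range s.length).map (fun j => some ((pvLcp s (s.drop j) : Nat) : Int)) := by
  apply List.ext_getElem
  · simp [pvZAlgo_length]
  · intro j h1 h2
    have hj : j < s.length := by simpa [pvZAlgo_length] using h1
    have := pvZAlgo_correct s hs j hj
    rw [List.getD_eq_getElem?_getD, List.getElem?_eq_getElem h1] at this
    simp only [Option.getD_some] at this
    simp [this]

lemma pvFoldA (sz : Nat) : ∀ (ts : List (Option Int)) (st c : Int), 1 ≤ st →
    (PySem.List.enumerate ts st).foldl
      (fun count iv =>
        if iv.1 = 0 then count
        else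
          match iv.2 with
          | some v => if (sz : Int) ≤ v then count + 1 else count
          | none => count) c
    = c + (ts.countP (fun ov =>
        match ov with
        | some v => decide ((sz : Int) ≤ v)
        | none => false) : Int) := by
  intro ts
  induction ts with
  | nil => intro st c hst; simp [PySem.List.enumerate_nil]
  | cons t ts ih =>
    intro st c hst
    rw [PySem.List.enumerate_cons, List.foldl_cons]
    have hst0 : ¬ (st = 0) := by omega
    rw [ih (st + 1) _ (by omega)]
    simp only [hst0, if_false]
    cases t with
    | none => simp
    | some v =>
      by_cases hv : (sz : Int) ≤ v
      · simp [hv]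
        ring
      · simp [hv]

lemma pvFoldB (p : Nat → Prop) [DecidablePred p] : ∀ (xs : List Nat) (c : Int),
    xs.foldl (fun acc x => acc + if p x then 1 else 0) c = c + (xs.countP (fun x => decide (p x)) : Int) := by
  intro xs
  induction xs with
  | nil => intro c; simp
  | cons x xs ih =>
    intro c
    rw [List.foldl_cons, ih]
    by_cases hx : p x
    · simp [hx]
      ring
    · simp [hx]

theorem pvMain (A B : String) : solve A B = solve_alt A B := by
  simp only [solve, solve_alt]
  set a := A.toList with ha
  set bl := PySem.List.slice (B.toList ++ B.toList) (some 0) (some (-1)) with hbl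
  set t := a ++ ['#'] ++ bl with ht
  have hlen : t.length = a.length + 1 + bl.length := by simp [ht]; omega
  have hne : t ≠ [] := by
    intro h
    rw [h] at hlen
    simp at hlen
    omega
  have htake : t.take a.length = a := by
    rw [ht, List.append_assoc, List.take_left]
  -- A side: reduce to countP over range (n-1)
  rw [pvZAlgo_eq_map t hne]
  have hrange : List.range t.length = 0 :: (List.range (t.length - 1)).map Nat.succ := by
    conv_lhs => rw [show t.length = (t.length - 1) + 1 by omega]
    rw [List.range_succ_eq_map]
  rw [hrange]
  rw [List.map_cons, PySem.List.enumerate_cons, List.foldl_cons]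
  simp only [if_true, List.map_map, zero_add]
  rw [pvFoldA a.length _ 1 0 le_rfl]
  rw [List.countP_map]
  -- B side
  rw [PySem.List.pyRange_one]
  have hnn : ((t.length : Int) - 1).toNat = t.length - 1 := by omega
  rw [hnn, List.foldl_map]
  rw [pvFoldB (fun k => PySem.List.slice t (some (1 + (k : Int))) (some ((1 + (k : Int)) + (a.length : Int))) = a) (List.range (t.length - 1)) 0]
  congr 1
  apply congrArg
  apply List.countP_congr
  intro k hk
  have hk' : k < t.length - 1 := List.mem_range.mp hk
  have hcast : (1 : Int) + (k : Int) = ((k + 1 : Nat) : Int) := by push_cast; ring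
  have hslice : PySem.List.slice t (some (1 + (k : Int))) (some ((1 + (k : Int)) + (a.length : Int)))
      = (t.drop (k + 1)).take a.length := by
    rw [hcast]
    exact PySem.List.slice_natCast_add t (k + 1) a.length
  have hiff : ((t.drop (k + 1)).take a.length = a) ↔ (a.length ≤ pvLcp t (t.drop (k + 1))) := by
    have h0 := pv_le_lcp_iff a.length t (t.drop (k + 1)) (by omega)
    rw [htake] at h0
    exact h0.symm
  simp only [Function.comp, Nat.succ_eq_add_one, hslice]
  by_cases h2 : a.length ≤ pvLcp t (t.drop (k + 1))
  · simp [hiff.mpr h2, Int.ofNat_le.mpr h2]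
  · have h3 : ¬ ((a.length : Int) ≤ ((pvLcp t (t.drop (k + 1)) : Nat) : Int)) := by
      exact_mod_cast h2
    simp [hiff, h2, h3]

-- ===== VERDICT (by name: the statement is the Claim_ definition above) =====
theorem solve_spec : Claim_equal_solve := by
  intro A B _
  unfold Spec_solve
  exact pvMain A B
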